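-- pv_equiv track=rewrite | github.com/AnshulPatil2005/soul-protocol | src/soul_protocol/engine/journal/scope.py | scopes_overlap
-- ===== SOURCE A (Python) =====
-- def scopes_overlap(granted: list[str], requested: list[str]) -> bool:
--     """Return True iff any requested pattern is covered by any granted one.
--
--     Policy pinned: this is intentionally symmetric against wildcards — a
--     credential granted for ``org:sales:*`` is usable by a requester
--     presenting a specific scope like ``org:sales:leads``, AND a credential
--     granted for a specific scope ``org:sales:leads`` is usable by a
--     requester presenting ``org:sales:*`` (a wildcard requester asserting
--     "I am operating anywhere in this subtree").
--
--     Both directions are deliberate. Breaking either: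
--       * reject specific-requester-vs-wildcard-grant -> admins who issue a
--         broad credential can't use it for any concrete call.
--       * reject wildcard-requester-vs-specific-grant -> a retrieval router
--         operating org-wide can't consume per-scope credentials, which
--         kneecaps fanout.
--     """
--     for req in requested:
--         req_parts = req.split(":")
--         for grant in granted:
--             grant_parts = grant.split(":")
--             if len(grant_parts) != len(req_parts):
--                 continue
--             if all(g == "*" or r == "*" or g == r for g, r in zip(grant_parts, req_parts)):
--                 return True
--     return False
-- ===== SOURCE B (Python) =====
-- def _covers(gp, rp):
--     """Simultaneous structural recursion over the two part lists:
--     equal length is enforced by the recursion shape itself."""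
--     if not gp and not rp:
--         return True
--     if not gp or not rp:
--         return False
--     g, r = gp[0], rp[0]
--     return (g == "*" or r == "*" or g == r) and _covers(gp[1:], rp[1:])
--
--
-- def scopes_overlap(granted: list[str], requested: list[str]) -> bool:
--     req_parts = [r.split(":") for r in requested]
--     return any(_covers(g.split(":"), rp) for g in granted for rp in req_parts)
-- ===== Notes on version B (the rewrite author's own statement) =====
-- stated objective: alternative
-- what changed: Loops swapped (grants outer, requests inner) with each request split exactly once up front, and the len-check + zip/all pair test replaced by a simultaneous structural recursion over the two part lists; overall an any-comprehension instead of loops with early return.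
import Mathlib
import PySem

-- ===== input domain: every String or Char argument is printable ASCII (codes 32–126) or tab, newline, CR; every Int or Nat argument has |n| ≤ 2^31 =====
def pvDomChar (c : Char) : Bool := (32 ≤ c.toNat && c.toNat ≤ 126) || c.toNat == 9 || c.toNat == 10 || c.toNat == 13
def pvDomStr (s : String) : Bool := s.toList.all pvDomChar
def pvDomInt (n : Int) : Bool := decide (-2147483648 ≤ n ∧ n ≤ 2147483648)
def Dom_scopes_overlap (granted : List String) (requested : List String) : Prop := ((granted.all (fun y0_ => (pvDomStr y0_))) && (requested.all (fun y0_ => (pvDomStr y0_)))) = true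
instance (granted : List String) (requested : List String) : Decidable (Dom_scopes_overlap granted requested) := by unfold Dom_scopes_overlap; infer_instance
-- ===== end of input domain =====

-- B changes decomposition only (swapped loops, splits precomputed, recursive pair match); no speed claim.
-- Equivalence is about the return value; neither program mutates its arguments.

-- ===== PORT A =====
-- s.split(":"): sep is the literal ":" ≠ "", so PySem.Str.split? always returns some; exact.
def splitColon (s : String) : List String := (PySem.Str.split? s ":").getD []

def scopes_overlap (granted : List String) (requested : List String) : Bool :=
  requested.any (fun req =>
    let req_parts := splitColon req
    granted.any (fun grant =>
      let grant_parts := splitColon grant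
      if grant_parts.length ≠ req_parts.length then false
      else (grant_parts.zip req_parts).all
        (fun p => p.1 == "*" || p.2 == "*" || p.1 == p.2)))

-- ===== PORT B =====
def covers : List String → List String → Bool
  | [], [] => true
  | [], _ :: _ => false
  | _ :: _, [] => false
  | g :: gs, r :: rs => (g == "*" || r == "*" || g == r) && covers gs rs

def scopes_overlap_alt (granted : List String) (requested : List String) : Bool :=
  let reqParts := requested.map (fun r => splitColon r)
  granted.any (fun g => reqParts.any (fun rp => covers (splitColon g) rp))

-- ===== PRECONDITION & SPEC =====
def Spec_scopes_overlap (granted : List String) (requested : List String) (out : Bool) : Prop := out = scopes_overlap_alt granted requested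
instance (granted : List String) (requested : List String) (out : Bool) : Decidable (Spec_scopes_overlap granted requested out) := by unfold Spec_scopes_overlap; infer_instance

-- ===== CLAIM (what is proved, stated in full; the proofs are below) =====
def Claim_equal_scopes_overlap : Prop := ∀ (granted : List String) (requested : List String), Dom_scopes_overlap granted requested → Spec_scopes_overlap granted requested (scopes_overlap granted requested)

-- ===== LEMMAS AND PROOFS =====
theorem covers_eq (gs rs : List String) :
    covers gs rs =
      (if gs.length ≠ rs.length then false
       else (gs.zip rs).all (fun p => p.1 == "*" || p.2 == "*" || p.1 == p.2)) := by
  induction gs generalizing rs with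
  | nil => cases rs <;> simp [covers]
  | cons g gs ih =>
    cases rs with
    | nil => simp [covers]
    | cons r rs =>
      simp only [covers, ih, List.zip_cons_cons, List.all_cons, List.length_cons]
      by_cases h : gs.length = rs.length <;> simp [h, Bool.and_comm]

theorem any_swap {α β : Type} (l1 : List α) (l2 : List β) (p : α → β → Bool) :
    l1.any (fun a => l2.any (fun b => p a b)) = l2.any (fun b => l1.any (fun a => p a b)) := by
  rw [Bool.eq_iff_iff]
  simp only [List.any_eq_true]
  tauto

-- ===== VERDICT (by name: the statement is the Claim_ definition above) =====
theorem scopes_overlap_spec : Claim_equal_scopes_overlap := by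
  intro granted requested _
  unfold Spec_scopes_overlap scopes_overlap scopes_overlap_alt
  simp only [List.any_map, covers_eq]
  exact (any_swap ..).symm
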